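-- pv_equiv track=rewrite | github.com/zhouzuoji666/runwork2_script | business/ldap_api.py | return_tp
-- ===== SOURCE A (Python) =====
-- def return_tp(tp):
--     s=0
--     for i in tp:
--         if i not in [2,3]:
--             s=s+i
--         else:
--             s=s-i
--     return s
-- ===== SOURCE B (Python) =====
-- def return_tp(tp):
--     return sum(tp) - 2 * sum(x for x in tp if x in (2, 3))
-- ===== Notes on version B (the rewrite author's own statement) =====
-- stated objective: simpler
-- what changed: Replaces the branching accumulator loop by a total-then-adjust decomposition: plain sum minus twice the sum of elements equal to 2 or 3.
import Mathlib
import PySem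

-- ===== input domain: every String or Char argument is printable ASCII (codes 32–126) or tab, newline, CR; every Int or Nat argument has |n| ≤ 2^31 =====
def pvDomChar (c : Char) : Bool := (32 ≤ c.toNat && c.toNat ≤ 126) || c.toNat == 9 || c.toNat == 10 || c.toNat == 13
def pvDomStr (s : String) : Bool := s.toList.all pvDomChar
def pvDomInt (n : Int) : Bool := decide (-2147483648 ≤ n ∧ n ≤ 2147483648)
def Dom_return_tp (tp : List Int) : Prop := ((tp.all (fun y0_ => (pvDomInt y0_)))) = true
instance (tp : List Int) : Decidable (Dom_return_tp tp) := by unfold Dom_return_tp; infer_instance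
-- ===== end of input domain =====

-- B replaces A's branching accumulator loop by sum(tp) minus twice the sum of the elements equal to 2 or 3 (simpler decomposition).

-- ===== PORT A =====
def return_tp (tp : List Int) : Int :=
  tp.foldl (fun s i => if ¬ (i = 2 ∨ i = 3) then s + i else s - i) 0

-- ===== PORT B =====
def return_tp_alt (tp : List Int) : Int :=
  tp.sum - 2 * (tp.filter (fun x => x = 2 ∨ x = 3)).sum

-- ===== PRECONDITION & SPEC =====
def Spec_return_tp (tp : List Int) (out : Int) : Prop := out = return_tp_alt tp
instance (tp : List Int) (out : Int) : Decidable (Spec_return_tp tp out) := by unfold Spec_return_tp; infer_instance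

-- ===== CLAIM (what is proved, stated in full; the proofs are below) =====
def Claim_equal_return_tp : Prop := ∀ (tp : List Int), Dom_return_tp tp → Spec_return_tp tp (return_tp tp)

-- ===== LEMMAS AND PROOFS =====
theorem return_tp_foldl_shift (tp : List Int) (s : Int) :
    tp.foldl (fun s i => if ¬ (i = 2 ∨ i = 3) then s + i else s - i) s
      = s + tp.sum - 2 * (tp.filter (fun x => x = 2 ∨ x = 3)).sum := by
  induction tp generalizing s with
  | nil => simp
  | cons h t ih =>
    rw [List.foldl_cons]
    by_cases hc : h = 2 ∨ h = 3
    · rw [if_neg (not_not_intro hc), ih]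
      simp only [List.filter_cons, List.sum_cons, decide_eq_true_eq]
      rw [if_pos (by simpa using hc)]
      simp only [List.sum_cons]; ring
    · rw [if_pos hc, ih]
      simp only [List.filter_cons, List.sum_cons]
      rw [if_neg (by simpa using hc)]
      ring

-- ===== VERDICT (by name: the statement is the Claim_ definition above) =====
theorem return_tp_spec : Claim_equal_return_tp := by
  intro tp _
  unfold Spec_return_tp return_tp return_tp_alt
  rw [return_tp_foldl_shift]
  ring
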